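-- pv_equiv track=rewrite | github.com/YevhenVovk1992/podoroznyky_site | app/blueprints/multilingual/routes.py | group_list_element
-- ===== SOURCE A (Python) =====
-- def group_list_element(data_list: list, n: int = 3):
--     """
--     The function groups the elements in a list. Adds them in increments equal to the number of groups
--     :param data_list: list with data
--     :param n: integer, how many elements was in the group
--     :return: a new list with items grouped into lists
--     """
--     result = []
--     for i in range(n):
--         cash_list = []
--         for el in range(0, len(data_list), n):
--             try:
--                 cash_list.append(data_list[el + i])
--             except IndexError:
--                 pass
--         result.append(cash_list.copy())
--     return result
-- ===== SOURCE B (Python) =====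
-- def group_list_element(data_list: list, n: int = 3):
--     """One-pass round-robin scatter into n buckets (instead of n strided passes)."""
--     if n < 1:
--         return []
--     result = [[] for _ in range(n)]
--     i = 0
--     for el in data_list:
--         result[i].append(el)
--         i += 1
--         if i == n:
--             i = 0
--     return result
-- ===== Notes on version B (the rewrite author's own statement) =====
-- stated objective: faster
-- what changed: Replaces A's n nested strided passes over the data (each probing indices with try/except) by a single round-robin pass that scatters every element into one of n pre-built buckets via a wrapping counter.
import Mathlib
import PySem

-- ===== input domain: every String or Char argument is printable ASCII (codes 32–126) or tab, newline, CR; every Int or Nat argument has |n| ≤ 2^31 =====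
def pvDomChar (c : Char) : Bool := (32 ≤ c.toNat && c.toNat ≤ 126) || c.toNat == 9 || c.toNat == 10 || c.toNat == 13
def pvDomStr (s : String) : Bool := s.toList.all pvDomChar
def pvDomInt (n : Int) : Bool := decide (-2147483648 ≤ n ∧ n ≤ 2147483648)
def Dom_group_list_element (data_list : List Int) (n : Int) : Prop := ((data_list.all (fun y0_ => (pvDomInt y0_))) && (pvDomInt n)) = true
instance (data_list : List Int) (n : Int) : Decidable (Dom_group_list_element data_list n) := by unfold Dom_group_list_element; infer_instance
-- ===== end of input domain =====

-- B replaces A's n strided passes by a single round-robin scatter pass; return values agree on all inputs.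

-- ===== PORT A =====
-- for i in range(n): for el in range(0, len(data_list), n): try cash.append(data_list[el+i]) except IndexError: pass
def group_list_element (data_list : List Int) (n : Int) : List (List Int) :=
  (PySem.List.pyRange 0 n 1).foldl
    (fun result i =>
      let cash_list :=
        (PySem.List.pyRange 0 (data_list.length : Int) n).foldl
          (fun cash el =>
            match PySem.List.pyGet? data_list (el + i) with
            | some v => cash ++ [v]      -- append succeeded
            | none => cash)              -- IndexError: pass
          []
      result ++ [cash_list])
    []

-- ===== PORT B =====
-- if n < 1: return []; result = [[] for _ in range(n)]; one pass, wrapping counter i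
def group_list_element_alt (data_list : List Int) (n : Int) : List (List Int) :=
  if n < 1 then []
  else
    let result : List (List Int) := (PySem.List.pyRange 0 n 1).map (fun _ => [])
    let st :=
      data_list.foldl
        (fun (st : List (List Int) × Int) el =>
          let result := PySem.List.pySetD st.1 st.2 (PySem.List.pyGetD st.1 st.2 [] ++ [el])
          let i := st.2 + 1
          (result, if i = n then 0 else i))
        (result, 0)
    st.1

-- ===== PRECONDITION & SPEC =====
def Spec_group_list_element (data_list : List Int) (n : Int) (out : List (List Int)) : Prop := out = group_list_element_alt data_list n
instance (data_list : List Int) (n : Int) (out : List (List Int)) : Decidable (Spec_group_list_element data_list n out) := by unfold Spec_group_list_element; infer_instance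

-- ===== CLAIM (what is proved, stated in full; the proofs are below) =====
def Claim_equal_group_list_element : Prop := ∀ (data_list : List Int) (n : Int), Dom_group_list_element data_list n → Spec_group_list_element data_list n (group_list_element data_list n)

-- ===== LEMMAS AND PROOFS =====

-- elements of l at positions 0, m, 2m, …
def everyNth (m : Nat) : List Int → List Int
  | [] => []
  | x :: xs => x :: everyNth m (xs.drop (m - 1))
termination_by l => l.length
decreasing_by simp

theorem everyNth_nil (m : Nat) : everyNth m [] = [] := by rw [everyNth]

theorem everyNth_cons (m : Nat) (x : Int) (xs : List Int) :
    everyNth m (x :: xs) = x :: everyNth m (xs.drop (m - 1)) := by rw [everyNth]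

theorem pyRange_pos_cons (a b s : Int) (hs : 0 < s) (h : a < b) :
    PySem.List.pyRange a b s = a :: PySem.List.pyRange (a + s) b s := by
  rw [PySem.List.pyRange_of_pos a b hs, PySem.List.pyRange_of_pos (a + s) b hs]
  have hq : 0 ≤ (b - a - 1) / s := Int.ediv_nonneg (by omega) (le_of_lt hs)
  have hrw : (b - a + s - 1) = (b - a - 1) + 1 * s := by ring
  have hdiv : (b - a + s - 1) / s = (b - a - 1) / s + 1 := by
    rw [hrw, Int.add_mul_ediv_right _ _ (by omega : s ≠ 0)]
  by_cases hab : a + s < b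
  · have hcount : (if a < b then ((b - a + s - 1) / s).toNat else 0)
        = (if a + s < b then ((b - (a + s) + s - 1) / s).toNat else 0) + 1 := by
      rw [if_pos h, if_pos hab]
      have : b - (a + s) + s - 1 = b - a - 1 := by ring
      rw [this, hdiv]; omega
    rw [hcount, List.range_succ_eq_map]
    simp only [List.map_cons, List.map_map, Nat.cast_zero, mul_zero, add_zero]
    congr 1
    apply List.map_congr_left; intro k _
    simp only [Function.comp_apply]; push_cast; ring
  · have hz : (b - a - 1) / s = 0 := Int.ediv_eq_zero_of_lt (by omega) (by omega)
    have hcount : (if a < b then ((b - a + s - 1) / s).toNat else 0) = 1 := by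
      rw [if_pos h, hdiv, hz]; rfl
    rw [hcount, if_neg hab]
    simp

-- step-s pyRange starting at s is the shift of one starting at 0
theorem pyRange_pos_shift (s L : Int) (hs : 0 < s) :
    PySem.List.pyRange s L s = (PySem.List.pyRange 0 (L - s) s).map (fun v => s + v) := by
  rw [PySem.List.pyRange_of_pos s L hs, PySem.List.pyRange_of_pos 0 (L - s) hs]
  rw [List.map_map]
  have hc : (if s < L then ((L - s + s - 1) / s).toNat else 0)
      = (if 0 < L - s then ((L - s - 0 + s - 1) / s).toNat else 0) := by
    by_cases hsl : s < L
    · rw [if_pos hsl, if_pos (by omega)]; ring_nf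
    · rw [if_neg hsl, if_neg (by omega)]
  rw [hc]
  apply List.map_congr_left; intro k _
  simp [Function.comp]

-- A's inner strided loop collects exactly the elements at positions i, i+m, i+2m, …
theorem inner_eq (data : List Int) (m : Int) (i : Nat) (hm : 0 < m) :
    (PySem.List.pyRange 0 (data.length : Int) m).flatMap
      (fun el => (PySem.List.pyGet? data (el + (i : Int))).toList)
    = everyNth m.toNat (data.drop i) := by
  induction hL : data.length using Nat.strong_induction_on generalizing data i with
  | _ L IH =>
  subst hL
  by_cases h0 : data.length = 0
  · rw [List.length_eq_zero_iff] at h0; subst h0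
    simp only [List.length_nil, Nat.cast_zero]
    rw [PySem.List.pyRange_of_pos 0 0 hm]
    simp [everyNth_nil]
  · have hLpos : 0 < (data.length : Int) := by omega
    rw [pyRange_pos_cons 0 (data.length : Int) m hm hLpos, List.flatMap_cons]
    simp only [zero_add]
    rw [pyRange_pos_shift m (data.length : Int) hm, List.flatMap_map]
    have htail : (PySem.List.pyRange 0 ((data.length : Int) - m) m).flatMap
          (fun a => (PySem.List.pyGet? data (m + a + (i : Int))).toList)
        = everyNth m.toNat ((data.drop m.toNat).drop i) := by
      have hcong : ∀ a ∈ PySem.List.pyRange 0 ((data.length : Int) - m) m,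
          (fun a => (PySem.List.pyGet? data (m + a + (i : Int))).toList) a
          = (fun el => (PySem.List.pyGet? (data.drop m.toNat) (el + (i : Int))).toList) a := by
        intro a ha
        rw [PySem.List.mem_pyRange_iff_of_pos hm] at ha
        obtain ⟨ha0, _, _⟩ := ha
        simp only
        have hidx : (m + a + (i : Int)).toNat = m.toNat + (a + (i : Int)).toNat := by omega
        rw [PySem.List.pyGet?_of_nonneg _ (by omega), PySem.List.pyGet?_of_nonneg _ (by omega),
          hidx, List.getElem?_drop]
      rw [List.flatMap_def, List.map_congr_left hcong, ← List.flatMap_def]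
      by_cases hml : m < (data.length : Int)
      · have hEq : ((data.drop m.toNat).length : Int) = (data.length : Int) - m := by
          simp [List.length_drop]; omega
        rw [← hEq]
        exact IH (data.drop m.toNat).length (by simp [List.length_drop]; omega) _ i rfl
      · rw [PySem.List.pyRange_of_pos 0 _ hm, if_neg (by omega)]
        have hnil : data.drop m.toNat = [] := List.drop_eq_nil_of_le (by omega)
        rw [hnil]
        simp [everyNth_nil]
    rw [htail, List.drop_drop]
    by_cases hi : i < data.length
    · rw [PySem.List.pyGet?_of_nonneg _ (by omega)]
      simp only [Int.toNat_natCast]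
      rw [List.getElem?_eq_getElem hi, List.drop_eq_getElem_cons hi, everyNth_cons]
      simp only [Option.toList_some, List.singleton_append, List.drop_drop]
      congr 2
      congr 1
      omega
    · rw [PySem.List.pyGet?_of_nonneg _ (by omega)]
      simp only [Int.toNat_natCast]
      rw [List.getElem?_eq_none (by omega)]
      rw [List.drop_eq_nil_of_le (by omega : data.length ≤ i)]
      rw [List.drop_eq_nil_of_le (by omega : data.length ≤ m.toNat + i)]
      simp [everyNth_nil]

-- invariant of B's round-robin scatter
theorem scatter_inv (m : Nat) (hm : 0 < m) (data : List Int) (acc : List (List Int))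
    (hacc : acc.length = m) (i : Nat) (hi : i < m) :
    (data.foldl
      (fun (st : List (List Int) × Int) el =>
        (PySem.List.pySetD st.1 st.2 (PySem.List.pyGetD st.1 st.2 [] ++ [el]),
          if st.2 + 1 = (m : Int) then 0 else st.2 + 1))
      (acc, (i : Int))).1
    = (List.range m).map (fun j =>
        acc.getD j [] ++ everyNth m (data.drop (if i ≤ j then j - i else j + m - i))) := by
  induction data generalizing acc i with
  | nil =>
    simp only [List.foldl_nil]
    apply List.ext_getElem
    · simp [hacc]
    · intro k h1 h2
      simp only [List.getElem_map, List.getElem_range, List.drop_nil, everyNth_nil,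
        List.append_nil]
      rw [List.getD_eq_getElem _ _ (by omega)]
  | cons x xs ih =>
    simp only [List.foldl_cons]
    have hset : PySem.List.pySetD acc (i : Int) (PySem.List.pyGetD acc (i : Int) [] ++ [x])
        = acc.set i (acc.getD i [] ++ [x]) := by
      rw [PySem.List.pySetD_natCast, PySem.List.pyGetD_natCast]
    have hsetlen : (acc.set i (acc.getD i [] ++ [x])).length = m := by simp [hacc]
    by_cases hcase : i + 1 = m
    · have hif : (if (i : Int) + 1 = (m : Int) then 0 else (i : Int) + 1) = ((0 : Nat) : Int) := by
        rw [if_pos (by exact_mod_cast hcase)]; simp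
      rw [hset, hif, ih _ hsetlen 0 (by omega)]
      apply List.map_congr_left; intro j hj
      rw [List.mem_range] at hj
      by_cases hji : j = i
      · subst hji
        rw [List.getD_eq_getElem _ _ (by omega), List.getElem_set_self (by omega),
          List.getD_eq_getElem _ _ (by omega)]
        have h1 : (if (0 : Nat) ≤ j then j - 0 else j + m - 0) = m - 1 := by
          rw [if_pos (by omega)]; omega
        have h2 : (if j ≤ j then j - j else j + m - j) = 0 := by rw [if_pos (by omega)]; omega
        rw [h1, h2, List.drop_zero, everyNth_cons]
        simp [List.append_assoc]
      · rw [List.getD_eq_getElem _ _ (by omega), List.getElem_set_ne (by omega),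
          ← List.getD_eq_getElem acc _ (by omega)]
        have hd : 1 ≤ (if i ≤ j then j - i else j + m - i) := by split_ifs <;> omega
        have h1 : (if (0 : Nat) ≤ j then j - 0 else j + m - 0)
            = (if i ≤ j then j - i else j + m - i) - 1 := by split_ifs <;> omega
        rw [h1]
        congr 1
        rcases Nat.exists_eq_add_of_le hd with ⟨d, hdEq⟩
        rw [hdEq, Nat.add_comm 1 d, List.drop_succ_cons]
        simp
    · have hif : (if (i : Int) + 1 = (m : Int) then 0 else (i : Int) + 1)
          = (((i + 1 : Nat)) : Int) := by
        rw [if_neg (by exact_mod_cast hcase)]; push_cast; ring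
      rw [hset, hif, ih _ hsetlen (i + 1) (by omega)]
      apply List.map_congr_left; intro j hj
      rw [List.mem_range] at hj
      by_cases hji : j = i
      · subst hji
        rw [List.getD_eq_getElem _ _ (by omega), List.getElem_set_self (by omega),
          List.getD_eq_getElem _ _ (by omega)]
        have h1 : (if j + 1 ≤ j then j - (j + 1) else j + m - (j + 1)) = m - 1 := by
          rw [if_neg (by omega)]; omega
        have h2 : (if j ≤ j then j - j else j + m - j) = 0 := by rw [if_pos (by omega)]; omega
        rw [h1, h2, List.drop_zero, everyNth_cons]
        simp [List.append_assoc]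
      · rw [List.getD_eq_getElem _ _ (by omega), List.getElem_set_ne (by omega),
          ← List.getD_eq_getElem acc _ (by omega)]
        have hd : 1 ≤ (if i ≤ j then j - i else j + m - i) := by split_ifs <;> omega
        have h1 : (if i + 1 ≤ j then j - (i + 1) else j + m - (i + 1))
            = (if i ≤ j then j - i else j + m - i) - 1 := by split_ifs <;> omega
        rw [h1]
        congr 1
        rcases Nat.exists_eq_add_of_le hd with ⟨d, hdEq⟩
        rw [hdEq, Nat.add_comm 1 d, List.drop_succ_cons]
        simp

-- A's output is the list of strided selections
theorem groupA_eq (data : List Int) (m : Nat) (hm : 0 < m) :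
    group_list_element data (m : Int)
    = (List.range m).map (fun k => everyNth m (data.drop k)) := by
  show (PySem.List.pyRange 0 (m : Int) 1).foldl
      (fun result i => result ++
        [(PySem.List.pyRange 0 (data.length : Int) (m : Int)).foldl
          (fun cash el =>
            match PySem.List.pyGet? data (el + i) with
            | some v => cash ++ [v]
            | none => cash) []]) []
    = _
  have hbody : (fun (result : List (List Int)) (i : Int) => result ++
        [(PySem.List.pyRange 0 (data.length : Int) (m : Int)).foldl
          (fun cash el =>
            match PySem.List.pyGet? data (el + i) with
            | some v => cash ++ [v]
            | none => cash) []])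
      = fun result i => result ++
        [(PySem.List.pyRange 0 (data.length : Int) (m : Int)).flatMap
          (fun el => (PySem.List.pyGet? data (el + i)).toList)] := by
    funext result i
    have hmatch : (fun (cash : List Int) (el : Int) =>
        match PySem.List.pyGet? data (el + i) with
        | some v => cash ++ [v]
        | none => cash)
        = fun cash el => cash ++ (PySem.List.pyGet? data (el + i)).toList := by
      funext cash el
      cases h : PySem.List.pyGet? data (el + i) <;> simp [h]
    rw [hmatch, PySem.List.foldl_append_eq_flatMap, List.nil_append]
  rw [hbody, PySem.List.foldl_append_singleton_eq_map, List.nil_append,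
    PySem.List.pyRange_one, List.map_map]
  have hms : ((m : Int) - 0).toNat = m := by omega
  rw [hms]
  apply List.map_congr_left
  intro k hk
  simp only [Function.comp_apply, zero_add]
  rw [inner_eq data (m : Int) k (by exact_mod_cast hm), Int.toNat_natCast]

theorem getD_map_empty {α : Type} (l : List α) (j : Nat) :
    (l.map (fun _ => ([] : List Int))).getD j [] = [] := by
  rw [List.getD_eq_getElem?_getD, List.getElem?_map]
  cases l[j]? <;> simp

-- B's output is the same list of strided selections
theorem groupB_eq (data : List Int) (m : Nat) (hm : 0 < m) :
    group_list_element_alt data (m : Int)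
    = (List.range m).map (fun k => everyNth m (data.drop k)) := by
  unfold group_list_element_alt
  rw [if_neg (by exact_mod_cast Nat.not_lt.mpr hm : ¬((m : Int) < 1))]
  show (data.foldl
      (fun (st : List (List Int) × Int) el =>
        (PySem.List.pySetD st.1 st.2 (PySem.List.pyGetD st.1 st.2 [] ++ [el]),
          if st.2 + 1 = (m : Int) then 0 else st.2 + 1))
      ((PySem.List.pyRange 0 (m : Int) 1).map (fun _ => []), ((0 : Nat) : Int))).1
    = _
  have hacc : ((PySem.List.pyRange 0 (m : Int) 1).map (fun _ => ([] : List Int))).length = m := by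
    rw [List.length_map, PySem.List.length_pyRange_one]
    omega
  rw [scatter_inv m hm data _ hacc 0 hm]
  apply List.map_congr_left
  intro j hj
  rw [getD_map_empty, if_pos (Nat.zero_le j), Nat.sub_zero, List.nil_append]

-- ===== VERDICT (by name: the statement is the Claim_ definition above) =====
theorem group_list_element_spec : Claim_equal_group_list_element := by
  intro data n _
  unfold Spec_group_list_element
  by_cases hn : n < 1
  · unfold group_list_element group_list_element_alt
    rw [if_pos hn, PySem.List.pyRange_one_eq_nil (by omega)]
    simp
  · obtain ⟨m, rfl⟩ : ∃ m : Nat, n = (m : Int) :=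
      ⟨n.toNat, (Int.toNat_of_nonneg (by omega)).symm⟩
    have hm : 0 < m := by omega
    rw [groupA_eq data m hm, groupB_eq data m hm]
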